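-- pv_equiv track=rewrite | github.com/lopes143/my-LEIC-projects | FP/2024_2025 - Project 1/FP2425P1.py | verifica_k_linhas_seq
-- ===== SOURCE A (Python) =====
-- def obtem_valor(tab, pos):
--     """
--     Recebe um tabuleiro e uma posição e retorna o valor contido nessa posição.
--
--     Parâmetros:
--         tab (tuple): Tabuleiro a ser analisado
--         pos (int): Posição a ser verificada
--     Ouptut:
--         b (int): Valor da posição verificada
--     """
--     i = 0
--     for a in tab:
--         for b in a:
--             i+=1
--             #Quando vai lendo os argumentos, o i vai aumentando progressivamente
--             #Assim o i corresponde à posição no número atualmente lido pelo for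
--             if i==pos:
--                 return b
--
-- def verifica_k_linhas_seq(elem, tab, pos, k):
--     """Função auxiliar para a função verifica_k_linhas"""
--     elemSeq=[] #Lista para guardar a sequência detetada temporariamente
--     for i in elem:
--         if len(elemSeq)>=k and (pos in elemSeq):
--             #Já temos uma sequência que cumpre os requisitos, já nem é preciso correr mais a função
--             return True
--         elif len(elemSeq)==0:
--             #A lista começa vazia, por isso temos de adicionar o primeiro elemento da lista e começar a avaliação para o segundo
--             elemSeq.append(i)
--         elif obtem_valor(tab, i)==obtem_valor(tab,elemSeq[-1]):
--             #Estamos perante uma sequência, ou seja, o valor atualmente lido é igual ao anterior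
--             elemSeq.append(i)
--         else:
--             #O valor não é igual, ou seja, já não existe sequência
--             elemSeq.clear()
--             elemSeq.append(i) #Volta a adicionar o último valor para a próxima verificação funcionar
--
--     if len(elemSeq)>=k and (pos in elemSeq):
--         #Se houver sequência mas acabar o for loop, deve checar aqui se é sequência
--         return True
--
--     return False #Não encontrou nenhuma coluna/linha/diagonal
-- ===== SOURCE B (Python) =====
-- def obtem_valor(tab, pos):
--     i = 0
--     for a in tab:
--         for b in a:
--             i += 1
--             if i == pos:
--                 return b
--
--
-- def verifica_k_linhas_seq(elem, tab, pos, k):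
--     """Group elem into maximal runs of consecutive positions with equal board value,
--     then uniformly check whether any run is long enough and contains pos."""
--     runs = []  # list of [value, [positions...]]
--     for p in elem:
--         v = obtem_valor(tab, p)
--         if runs and runs[-1][0] == v:
--             runs[-1][1].append(p)
--         else:
--             runs.append([v, [p]])
--     return any(len(g) >= k and pos in g for _, g in runs)
-- ===== Notes on version B (the rewrite author's own statement) =====
-- stated objective: idiomatic
-- what changed: B first partitions elem into maximal runs of consecutive positions with equal board value (a groupby pass) and then does one uniform any() check over the runs, replacing A's incremental append/clear state machine with mid-loop and post-loop early-return checks.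
import Mathlib
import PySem

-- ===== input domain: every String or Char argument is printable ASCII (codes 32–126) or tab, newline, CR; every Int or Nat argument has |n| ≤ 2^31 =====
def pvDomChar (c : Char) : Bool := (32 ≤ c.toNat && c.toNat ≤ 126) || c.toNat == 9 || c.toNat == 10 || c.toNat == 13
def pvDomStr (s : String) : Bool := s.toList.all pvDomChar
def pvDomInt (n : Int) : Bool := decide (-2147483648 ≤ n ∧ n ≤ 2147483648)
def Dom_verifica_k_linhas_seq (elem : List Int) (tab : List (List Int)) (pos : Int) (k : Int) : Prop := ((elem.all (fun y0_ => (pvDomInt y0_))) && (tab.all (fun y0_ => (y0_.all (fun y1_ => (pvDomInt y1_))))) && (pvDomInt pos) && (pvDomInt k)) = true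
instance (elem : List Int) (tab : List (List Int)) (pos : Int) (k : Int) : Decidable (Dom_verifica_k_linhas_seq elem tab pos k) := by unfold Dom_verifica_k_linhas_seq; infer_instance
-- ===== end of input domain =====

-- B replaces A's incremental append/clear early-return state machine by a groupby-style
-- pass building the maximal equal-value runs followed by one uniform any() check (idiomatic).

-- ===== PORT A =====
-- obtem_valor: counts through the flattened board; returns none when pos is never hit (Python None).
def ovRow (pos : Int) (i : Int) : List Int → Int × Option Int
  | [] => (i, none)
  | b :: bs => if i + 1 = pos then (i + 1, some b) else ovRow pos (i + 1) bs

def ovTab (pos : Int) (i : Int) : List (List Int) → Option Int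
  | [] => none
  | a :: rest =>
    match ovRow pos i a with
    | (_, some b) => some b
    | (i', none) => ovTab pos i' rest

def obtem_valor (tab : List (List Int)) (pos : Int) : Option Int := ovTab pos 0 tab

-- A's loop: elemSeq is the current run; mid-loop early-return check, clear+append on break.
-- elemSeq[-1] is read only when elemSeq is nonempty; getLastD 0 is exact there.
def vklLoop (tab : List (List Int)) (pos k : Int) : List Int → List Int → Bool
  | [], seq => decide (k ≤ (seq.length : Int) ∧ pos ∈ seq)
  | i :: rest, seq =>
    if k ≤ (seq.length : Int) ∧ pos ∈ seq then true
    else if seq.length = 0 then vklLoop tab pos k rest (seq ++ [i])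
    else if obtem_valor tab i = obtem_valor tab (seq.getLastD 0) then vklLoop tab pos k rest (seq ++ [i])
    else vklLoop tab pos k rest [i]

def verifica_k_linhas_seq (elem : List Int) (tab : List (List Int)) (pos : Int) (k : Int) : Bool :=
  vklLoop tab pos k elem []

-- ===== PORT B =====
-- buildRuns: each run is (value, positions); extend the last run on equal value, else start a new one.
def buildRuns (tab : List (List Int)) : List Int → List (Option Int × List Int) → List (Option Int × List Int)
  | [], runs => runs
  | p :: rest, runs =>
    let v := obtem_valor tab p
    match runs.getLast? with
    | some (kv, g) =>
      if kv = v then buildRuns tab rest (runs.dropLast ++ [(kv, g ++ [p])])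
      else buildRuns tab rest (runs ++ [(v, [p])])
    | none => buildRuns tab rest [(v, [p])]

def verifica_k_linhas_seq_alt (elem : List Int) (tab : List (List Int)) (pos : Int) (k : Int) : Bool :=
  (buildRuns tab elem []).any (fun r => decide (k ≤ (r.2.length : Int) ∧ pos ∈ r.2))

-- ===== PRECONDITION & SPEC =====
def Spec_verifica_k_linhas_seq (elem : List Int) (tab : List (List Int)) (pos : Int) (k : Int) (out : Bool) : Prop := out = verifica_k_linhas_seq_alt elem tab pos k
instance (elem : List Int) (tab : List (List Int)) (pos : Int) (k : Int) (out : Bool) : Decidable (Spec_verifica_k_linhas_seq elem tab pos k out) := by unfold Spec_verifica_k_linhas_seq; infer_instance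

-- ===== CLAIM (what is proved, stated in full; the proofs are below) =====
def Claim_equal_verifica_k_linhas_seq : Prop := ∀ (elem : List Int) (tab : List (List Int)) (pos : Int) (k : Int), Dom_verifica_k_linhas_seq elem tab pos k → Spec_verifica_k_linhas_seq elem tab pos k (verifica_k_linhas_seq elem tab pos k)

-- ===== LEMMAS AND PROOFS =====

-- the uniform run check
def runQ (pos k : Int) (r : Option Int × List Int) : Bool :=
  decide (k ≤ (r.2.length : Int) ∧ pos ∈ r.2)

-- run qualification is monotone under extending the run's position list
theorem runQ_extend (pos k : Int) (kv : Option Int) (g : List Int) (p : Int)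
    (h : runQ pos k (kv, g) = true) : runQ pos k (kv, g ++ [p]) = true := by
  simp only [runQ, decide_eq_true_eq] at h ⊢
  refine ⟨?_, ?_⟩
  · have := h.1; simp only [List.length_append, List.length_cons, List.length_nil]
    push_cast; omega
  · exact List.mem_append.mpr (Or.inl h.2)

-- once some already-built run qualifies, buildRuns keeps a qualifying run
theorem buildRuns_any_mono (tab : List (List Int)) (pos k : Int) :
    ∀ (l : List Int) (rs : List (Option Int × List Int)),
      rs.any (runQ pos k) = true → (buildRuns tab l rs).any (runQ pos k) = true := by
  intro l
  induction l with
  | nil => intro rs h; simpa [buildRuns] using h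
  | cons p rest ih =>
    intro rs h
    rcases rs.eq_nil_or_concat with rfl | ⟨rs', r, rfl⟩
    · simp at h
    · rcases r with ⟨kv, g⟩
      simp only [List.concat_eq_append] at h ⊢
      simp only [buildRuns, List.getLast?_concat, List.dropLast_concat]
      by_cases hc : kv = obtem_valor tab p
      · rw [if_pos hc]
        apply ih
        rcases (List.any_eq_true.mp h) with ⟨x, hx, hqx⟩
        rcases List.mem_append.mp hx with hx' | hx'
        · exact List.any_eq_true.mpr ⟨x, List.mem_append.mpr (Or.inl hx'), hqx⟩
        · have : x = (kv, g) := by simpa using hx'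
          subst this
          exact List.any_eq_true.mpr ⟨(kv, g ++ [p]), by simp, runQ_extend pos k kv g p hqx⟩
      · rw [if_neg hc]
        apply ih
        simp only [List.any_append, Bool.or_eq_true] at h ⊢
        exact Or.inl h

-- main simulation: A's current run g is the (unqualifying) last run of B's list
theorem vkl_sim (tab : List (List Int)) (pos k : Int) :
    ∀ (l g : List Int) (kv : Option Int) (rs : List (Option Int × List Int)),
      g ≠ [] → obtem_valor tab (g.getLastD 0) = kv → rs.any (runQ pos k) = false →
      vklLoop tab pos k l g = (buildRuns tab l (rs ++ [(kv, g)])).any (runQ pos k) := by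
  intro l
  induction l with
  | nil =>
    intro g kv rs hg hlast hrs
    simp [vklLoop, buildRuns, List.any_append, hrs, runQ]
  | cons i rest ih =>
    intro g kv rs hg hlast hrs
    by_cases hq : k ≤ (g.length : Int) ∧ pos ∈ g
    · -- A returns early; B's last run already qualifies
      rw [vklLoop, if_pos hq]
      symm
      apply buildRuns_any_mono
      simp only [List.any_append]
      have : runQ pos k (kv, g) = true := by simp [runQ, hq]
      simp [this]
    · rw [vklLoop, if_neg hq, if_neg (by simpa [List.length_eq_zero_iff] using hg)]
      simp only [buildRuns, List.getLast?_concat, List.dropLast_concat]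
      by_cases hc : obtem_valor tab i = obtem_valor tab (g.getLastD 0)
      · rw [if_pos hc, if_pos (by rw [← hlast]; exact hc.symm)]
        exact ih (g ++ [i]) kv rs (by simp) (by rw [List.getLastD_concat]; exact hc.trans hlast) hrs
      · rw [if_neg hc, if_neg (by rw [← hlast]; exact fun h => hc h.symm)]
        apply ih [i] (obtem_valor tab i) (rs ++ [(kv, g)]) (by simp) (by simp)
        simp only [List.any_append, hrs, Bool.false_or, List.any_cons, List.any_nil,
          Bool.or_false]
        simp [runQ, hq]

-- ===== VERDICT (by name: the statement is the Claim_ definition above) =====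
theorem verifica_k_linhas_seq_spec : Claim_equal_verifica_k_linhas_seq := by
  intro elem tab pos k _
  unfold Spec_verifica_k_linhas_seq verifica_k_linhas_seq verifica_k_linhas_seq_alt
  cases elem with
  | nil => simp [vklLoop, buildRuns]
  | cons i rest =>
    rw [vklLoop, if_neg (by simp), if_pos (show (([]:List Int)).length = 0 from rfl)]
    simp only [buildRuns, List.getLast?_nil, List.nil_append]
    have := vkl_sim tab pos k rest [i] (obtem_valor tab i) [] (by simp) (by simp) (by simp)
    unfold runQ at this
    exact this
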